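-- pv_equiv track=rewrite | github.com/c-renz/py-renz | IBM_assessment/max_distinct_sum.py | max_distinct_split_sum
-- ===== SOURCE A (Python) =====
-- def max_distinct_split_sum(arr):
--     n = len(arr)
--     left_set = set()
--     right_counter = {}
--
--     # Initialize right part counter
--     for num in arr:
--         right_counter[num] = right_counter.get(num, 0) + 1
--
--     max_sum = 0
--     left_set = set()
--
--     for i in range(n - 1):  # We must leave at least one element in the right subarray
--         num = arr[i]
--         left_set.add(num)
--
--         right_counter[num] -= 1
--         if right_counter[num] == 0:
--             del right_counter[num]
--
--         current_sum = len(left_set) + len(right_counter)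
--         max_sum = max(max_sum, current_sum)
--
--     return max_sum
-- ===== SOURCE B (Python) =====
-- def max_distinct_split_sum(arr):
--     n = len(arr)
--     prefix = []
--     seen = set()
--     for x in arr:
--         seen.add(x)
--         prefix.append(len(seen))
--     suffix = []
--     seen = set()
--     for x in reversed(arr):
--         seen.add(x)
--         suffix.append(len(seen))
--     suffix.reverse()
--     best = 0
--     for i in range(n - 1):
--         best = max(best, prefix[i] + suffix[i + 1])
--     return best
-- ===== Notes on version B (the rewrite author's own statement) =====
-- stated objective: alternative
-- what changed: Instead of one interleaved pass that mutates a set and a count dictionary (with per-step decrement and deletion) simultaneously, B precomputes two tables - prefix distinct counts (left-to-right) and suffix distinct counts (right-to-left) - and combines them with max(prefix[i]+suffix[i+1]) in a separate pass.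
import Mathlib
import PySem

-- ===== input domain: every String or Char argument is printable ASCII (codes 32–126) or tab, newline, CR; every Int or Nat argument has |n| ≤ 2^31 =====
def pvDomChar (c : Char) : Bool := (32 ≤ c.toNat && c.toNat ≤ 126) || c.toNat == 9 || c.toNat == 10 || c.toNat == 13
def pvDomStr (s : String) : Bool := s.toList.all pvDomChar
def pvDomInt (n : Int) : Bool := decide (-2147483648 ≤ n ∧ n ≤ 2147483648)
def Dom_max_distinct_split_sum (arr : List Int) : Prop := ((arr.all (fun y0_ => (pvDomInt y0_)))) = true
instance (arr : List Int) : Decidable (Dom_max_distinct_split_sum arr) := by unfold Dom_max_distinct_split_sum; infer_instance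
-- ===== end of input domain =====

-- B replaces A's single interleaved set+counter pass by two precomputed distinct-count
-- tables (prefix and suffix) combined in a final pass; same O(n) cost, different structure.


-- ===== PORT A =====
def max_distinct_split_sum (arr : List Int) : Int :=
  let n : Int := (arr.length : Int)
  let right_counter : PySem.Dict Int Int :=
    arr.foldl (fun d num => d.insert num (d.getD num 0 + 1)) PySem.Dict.empty
  let st :=
    (PySem.List.pyRange 0 (n - 1) 1).foldl
      (fun (st : PySem.Set Int × PySem.Dict Int Int × Int) i =>
        let left_set := st.1
        let rc := st.2.1
        let max_sum := st.2.2
        let num := PySem.List.pyGetD arr i 0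
        let left_set := PySem.Set.add left_set num
        let rc := rc.modify num 0 (fun v => v - 1)
        let rc := if rc.getD num 0 = 0 then rc.erase num else rc
        let current_sum := PySem.Set.len left_set + (rc.size : Int)
        (left_set, rc, max max_sum current_sum))
      (PySem.Set.empty, right_counter, 0)
  st.2.2

-- ===== PORT B =====
def max_distinct_split_sum_alt (arr : List Int) : Int :=
  let n : Int := (arr.length : Int)
  let prefixL :=
    (arr.foldl (fun (st : PySem.Set Int × List Int) x =>
        let seen := PySem.Set.add st.1 x
        (seen, st.2 ++ [PySem.Set.len seen])) (PySem.Set.empty, [])).2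
  let suffixL :=
    ((arr.reverse.foldl (fun (st : PySem.Set Int × List Int) x =>
        let seen := PySem.Set.add st.1 x
        (seen, st.2 ++ [PySem.Set.len seen])) (PySem.Set.empty, [])).2).reverse
  (PySem.List.pyRange 0 (n - 1) 1).foldl
    (fun best i => max best (PySem.List.pyGetD prefixL i 0 + PySem.List.pyGetD suffixL (i + 1) 0)) 0

-- ===== PRECONDITION & SPEC =====
def Spec_max_distinct_split_sum (arr : List Int) (out : Int) : Prop := out = max_distinct_split_sum_alt arr
instance (arr : List Int) (out : Int) : Decidable (Spec_max_distinct_split_sum arr out) := by unfold Spec_max_distinct_split_sum; infer_instance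

-- ===== CLAIM (what is proved, stated in full; the proofs are below) =====
def Claim_equal_max_distinct_split_sum : Prop := ∀ (arr : List Int), Dom_max_distinct_split_sum arr → Spec_max_distinct_split_sum arr (max_distinct_split_sum arr)

-- ===== LEMMAS AND PROOFS =====

-- number of distinct elements of a list, as an Int
def pvD (xs : List Int) : Int := ((PySem.Set.ofList xs).length : Int)

-- the distinct elements of arr that still occur in arr.drop m (in first-occurrence order of arr)
def pvSfx (arr : List Int) (m : Nat) : List Int :=
  (PySem.Set.ofList arr).filter (fun k => decide ((arr.drop m).count k ≠ 0))

-- explicit form of A's right_counter after the first m loop iterations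
def pvRC (arr : List Int) (m : Nat) : PySem.Dict Int Int :=
  PySem.Dict.mk ((pvSfx arr m).map (fun k => (k, (((arr.drop m).count k : Nat) : Int))))

-- A's max_sum after the first m loop iterations
def pvBest (arr : List Int) (m : Nat) : Int :=
  (List.range m).foldl (fun b i => max b (pvD (arr.take (i+1)) + pvD (arr.drop (i+1)))) 0

theorem pv_getElem_idx (l : List Int) (i j : Nat) (h : i = j) (hi : i < l.length) :
    l[i]'hi = l[j]'(h ▸ hi) := by subst h; rfl

theorem pvD_perm {xs ys : List Int} (h : xs.Perm ys) : pvD xs = pvD ys := by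
  unfold pvD
  have : (PySem.Set.ofList xs).Perm (PySem.Set.ofList ys) := by
    rw [List.perm_ext_iff_of_nodup (PySem.Set.nodup_ofList xs) (PySem.Set.nodup_ofList ys)]
    intro a
    simp [PySem.Set.mem_ofList, h.mem_iff]
  exact congrArg (fun n : Nat => (n : Int)) this.length_eq

theorem mem_pvSfx (arr : List Int) (m : Nat) (k : Int) :
    k ∈ pvSfx arr m ↔ k ∈ arr.drop m := by
  unfold pvSfx
  simp only [List.mem_filter, PySem.Set.mem_ofList, decide_eq_true_eq]
  constructor
  · rintro ⟨-, h⟩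
    exact List.count_pos_iff.mp (Nat.pos_of_ne_zero h)
  · intro h
    exact ⟨List.mem_of_mem_drop h, Nat.pos_iff_ne_zero.mp (List.count_pos_iff.mpr h)⟩

theorem nodup_pvSfx (arr : List Int) (m : Nat) : (pvSfx arr m).Nodup :=
  (PySem.Set.nodup_ofList arr).filter _

theorem length_pvSfx (arr : List Int) (m : Nat) :
    ((pvSfx arr m).length : Int) = pvD (arr.drop m) := by
  unfold pvD
  have : (pvSfx arr m).Perm (PySem.Set.ofList (arr.drop m)) := by
    rw [List.perm_ext_iff_of_nodup (nodup_pvSfx arr m) (PySem.Set.nodup_ofList _)]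
    intro a
    rw [mem_pvSfx, PySem.Set.mem_ofList]
  exact congrArg (fun n : Nat => (n : Int)) this.length_eq

theorem keys_pvRC (arr : List Int) (m : Nat) : (pvRC arr m).keys = pvSfx arr m := by
  simp [pvRC, PySem.Dict.keys, List.map_map, Function.comp_def]

theorem nodup_keys_pvRC (arr : List Int) (m : Nat) : (pvRC arr m).keys.Nodup := by
  rw [keys_pvRC]; exact nodup_pvSfx arr m

theorem rc_init (arr : List Int) :
    arr.foldl (fun d num => d.insert num (d.getD num 0 + 1)) PySem.Dict.empty = pvRC arr 0 := by
  rw [PySem.Dict.foldl_insert_getD_add_one_eq_counter]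
  apply PySem.Dict.ext
  rw [PySem.Dict.items_counter]
  unfold pvRC pvSfx
  have hf : (PySem.Set.ofList arr).filter (fun k => decide ((arr.drop 0).count k ≠ 0))
      = PySem.Set.ofList arr := by
    rw [List.filter_eq_self]
    intro a ha
    simp only [decide_eq_true_eq, List.drop_zero]
    exact Nat.pos_iff_ne_zero.mp
      (List.count_pos_iff.mpr ((PySem.Set.mem_ofList arr a).mp ha))
  rw [hf]
  simp

theorem getD_pvRC (arr : List Int) (m : Nat) {num : Int} (h : num ∈ arr.drop m) :
    (pvRC arr m).getD num 0 = (((arr.drop m).count num : Nat) : Int) := by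
  have hmem : (num, (((arr.drop m).count num : Nat) : Int)) ∈ (pvRC arr m).items := by
    unfold pvRC
    simp only [List.mem_map]
    exact ⟨num, (mem_pvSfx arr m num).mpr h, rfl⟩
  have := PySem.Dict.get?_of_mem_items (pvRC arr m) hmem (nodup_keys_pvRC arr m)
  simp [PySem.Dict.getD, this]

theorem contains_pvRC (arr : List Int) (m : Nat) {num : Int} (h : num ∈ arr.drop m) :
    (pvRC arr m).contains num = true := by
  rw [PySem.Dict.contains_iff_mem_keys, keys_pvRC]
  exact (mem_pvSfx arr m num).mpr h

theorem pvRC_step (arr : List Int) (m : Nat) (hm : m < arr.length) :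
    (if ((pvRC arr m).modify arr[m] 0 (fun v => v - 1)).getD arr[m] 0 = 0
     then ((pvRC arr m).modify arr[m] 0 (fun v => v - 1)).erase arr[m]
     else (pvRC arr m).modify arr[m] 0 (fun v => v - 1)) = pvRC arr (m+1) := by
  have hd : arr.drop m = arr[m] :: arr.drop (m+1) := List.drop_eq_getElem_cons hm
  have hmem : arr[m] ∈ arr.drop m := by rw [hd]; exact List.mem_cons_self
  have hcnt : (arr.drop m).count arr[m] = (arr.drop (m+1)).count arr[m] + 1 := by
    conv_lhs => rw [hd]
    exact List.count_cons_self
  have hmod : (pvRC arr m).modify arr[m] 0 (fun v => v - 1)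
      = (pvRC arr m).insert arr[m] (((arr.drop (m+1)).count arr[m] : Nat) : Int) := by
    unfold PySem.Dict.modify
    rw [getD_pvRC arr m hmem]
    congr 1
    rw [hcnt]
    push_cast
    ring
  have hgd2 : ((pvRC arr m).modify arr[m] 0 (fun v => v - 1)).getD arr[m] 0
      = (((arr.drop (m+1)).count arr[m] : Nat) : Int) := by
    rw [hmod]; exact PySem.Dict.getD_insert_self _ _ _ _
  have hitems : ((pvRC arr m).insert arr[m] (((arr.drop (m+1)).count arr[m] : Nat) : Int)).items
      = (pvSfx arr m).map (fun k => if k == arr[m]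
          then (arr[m], (((arr.drop (m+1)).count arr[m] : Nat) : Int))
          else (k, (((arr.drop m).count k : Nat) : Int))) := by
    rw [PySem.Dict.items_insert_of_contains _ _ (contains_pvRC arr m hmem)]
    unfold pvRC
    rw [List.map_map]
    apply List.map_congr_left
    intro k hk
    by_cases h : k = arr[m] <;> simp [h, Function.comp]
  rw [hgd2, hmod]
  by_cases hz : (arr.drop (m+1)).count arr[m] = 0
  · rw [if_pos (by exact_mod_cast hz)]
    apply PySem.Dict.ext
    unfold PySem.Dict.erase
    show List.filter _ ((pvRC arr m).insert arr[m] _).items = _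
    rw [hitems, List.filter_map]
    have hpred : ((fun p : Int × Int => !(p.1 == arr[m])) ∘ (fun k => if k == arr[m]
          then (arr[m], (((arr.drop (m+1)).count arr[m] : Nat) : Int))
          else (k, (((arr.drop m).count k : Nat) : Int)))) = fun k => !(k == arr[m]) := by
      funext k; by_cases h : k = arr[m] <;> simp [h]
    rw [hpred]
    have hsfx : (pvSfx arr m).filter (fun k => !(k == arr[m])) = pvSfx arr (m+1) := by
      unfold pvSfx
      rw [List.filter_filter]
      apply List.filter_congr
      intro k hk
      by_cases h : k = arr[m]
      · subst h; simp [hz]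
      · have : (arr.drop m).count k = (arr.drop (m+1)).count k := by
          rw [hd, List.count_cons_of_ne (fun hh => h hh.symm)]
        simp [h, this]
    rw [hsfx]
    unfold pvRC
    apply List.map_congr_left
    intro k hk
    have hkne : k ≠ arr[m] := by
      intro h
      subst h
      have hmem2 := (mem_pvSfx arr (m+1) _).mp hk
      have := List.count_pos_iff.mpr hmem2
      omega
    have hcq : (arr.drop m).count k = (arr.drop (m+1)).count k := by
      rw [hd, List.count_cons_of_ne (fun hh => hkne hh.symm)]
    simp [hkne, hcq]
  · rw [if_neg (by exact_mod_cast hz)]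
    apply PySem.Dict.ext
    rw [hitems]
    have hsfx : pvSfx arr (m+1) = pvSfx arr m := by
      unfold pvSfx
      apply List.filter_congr
      intro k hk
      by_cases h : k = arr[m]
      · subst h; simp [hz, hcnt]
      · have : (arr.drop m).count k = (arr.drop (m+1)).count k := by
          rw [hd, List.count_cons_of_ne (fun hh => h hh.symm)]
        simp [this]
    show _ = (pvRC arr (m+1)).items
    unfold pvRC
    rw [hsfx]
    apply List.map_congr_left
    intro k hk
    by_cases h : k = arr[m]
    · subst h; simp
    · have hcq : (arr.drop m).count k = (arr.drop (m+1)).count k := by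
        rw [hd, List.count_cons_of_ne (fun hh => h hh.symm)]
      simp [h, hcq]

theorem size_pvRC (arr : List Int) (m : Nat) :
    ((pvRC arr m).size : Int) = pvD (arr.drop m) := by
  unfold pvRC PySem.Dict.size
  simp only [List.length_map]
  exact length_pvSfx arr m

theorem take_set_step (arr : List Int) (m : Nat) (hm : m < arr.length) :
    PySem.Set.add (PySem.Set.ofList (arr.take m)) arr[m] = PySem.Set.ofList (arr.take (m+1)) := by
  rw [← PySem.Set.ofList_append_singleton]
  congr 1
  rw [List.take_add_one, List.getElem?_eq_getElem hm]
  rfl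

theorem pvBest_succ (arr : List Int) (m : Nat) :
    pvBest arr (m+1) = max (pvBest arr m) (pvD (arr.take (m+1)) + pvD (arr.drop (m+1))) := by
  unfold pvBest
  rw [List.range_succ, List.foldl_append]
  rfl

theorem A_loop (arr : List Int) (m : Nat) (hm : m ≤ arr.length) :
    List.foldl
      (fun (st : PySem.Set Int × PySem.Dict Int Int × Int) i =>
        let left_set := st.1
        let rc := st.2.1
        let max_sum := st.2.2
        let num := PySem.List.pyGetD arr i 0
        let left_set := PySem.Set.add left_set num
        let rc := rc.modify num 0 (fun v => v - 1)
        let rc := if rc.getD num 0 = 0 then rc.erase num else rc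
        let current_sum := PySem.Set.len left_set + (rc.size : Int)
        (left_set, rc, max max_sum current_sum))
      (PySem.Set.empty, pvRC arr 0, 0)
      (List.map (fun k : Nat => (k : Int)) (List.range m))
    = (PySem.Set.ofList (arr.take m), pvRC arr m, pvBest arr m) := by
  induction m with
  | zero => rfl
  | succ m ih =>
    have hm' : m < arr.length := hm
    rw [List.range_succ, List.map_append, List.foldl_append, ih hm'.le]
    simp only [List.map_cons, List.map_nil, List.foldl_cons, List.foldl_nil]
    have hnum : PySem.List.pyGetD arr (↑m) 0 = arr[m] := by
      rw [PySem.List.pyGetD_natCast, List.getD_eq_getElem arr 0 hm']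
    simp only [hnum]
    rw [take_set_step arr m hm', pvRC_step arr m hm', size_pvRC, pvBest_succ]
    rfl

theorem fold_build (l : List Int) (s : PySem.Set Int) (acc : List Int) :
    List.foldl
      (fun (st : PySem.Set Int × List Int) x =>
        let seen := PySem.Set.add st.1 x
        (seen, st.2 ++ [PySem.Set.len seen])) (s, acc) l
    = (PySem.Set.update s l,
       acc ++ (List.range l.length).map (fun i => PySem.Set.len (PySem.Set.update s (l.take (i+1))))) := by
  induction l generalizing s acc with
  | nil => simp [PySem.Set.update_nil]
  | cons x t ih =>
    simp only [List.foldl_cons]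
    rw [ih]
    simp [List.range_succ_eq_map, List.map_map, PySem.Set.update_cons, PySem.Set.update_nil,
      Function.comp_def, Nat.succ_eq_add_one]

theorem B_eq (arr : List Int) (hne : arr ≠ []) :
    max_distinct_split_sum_alt arr = pvBest arr (arr.length - 1) := by
  have hlen : 1 ≤ arr.length := List.length_pos_iff.mpr hne
  have hB : max_distinct_split_sum_alt arr
      = (PySem.List.pyRange 0 ((arr.length : Int) - 1) 1).foldl
          (fun best i => max best
            (PySem.List.pyGetD
              ((arr.foldl (fun (st : PySem.Set Int × List Int) x =>
                  let seen := PySem.Set.add st.1 x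
                  (seen, st.2 ++ [PySem.Set.len seen])) (PySem.Set.empty, [])).2) i 0 +
             PySem.List.pyGetD
              (((arr.reverse.foldl (fun (st : PySem.Set Int × List Int) x =>
                  let seen := PySem.Set.add st.1 x
                  (seen, st.2 ++ [PySem.Set.len seen])) (PySem.Set.empty, [])).2).reverse) (i + 1) 0)) 0 := rfl
  rw [fold_build arr PySem.Set.empty [], fold_build arr.reverse PySem.Set.empty []] at hB
  simp only [List.nil_append, PySem.Set.update_empty, List.length_reverse] at hB
  have hcast : ((arr.length : Int) - 1) = ((arr.length - 1 : Nat) : Int) := by omega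
  rw [hcast, PySem.List.pyRange_zero_natCast, List.foldl_map] at hB
  rw [hB]
  unfold pvBest
  apply PySem.List.foldl_congr_mem
  intro acc i hi
  rw [List.mem_range] at hi
  have hi1 : i < arr.length := by omega
  have hgp : PySem.List.pyGetD
      ((List.range arr.length).map (fun i => PySem.Set.len (PySem.Set.ofList (arr.take (i+1))))) (↑i) 0
      = pvD (arr.take (i+1)) := by
    rw [PySem.List.pyGetD_natCast, List.getD_eq_getElem _ 0 (by simpa using hi1)]
    simp [pvD, PySem.Set.len]
  have hcast2 : ((i : Int) + 1) = ((i + 1 : Nat) : Int) := by push_cast; ring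
  have hgs : PySem.List.pyGetD
      (((List.range arr.length).map (fun j => PySem.Set.len (PySem.Set.ofList (arr.reverse.take (j+1))))).reverse) ((i : Int) + 1) 0
      = pvD (arr.drop (i+1)) := by
    rw [hcast2, PySem.List.pyGetD_natCast,
      List.getD_eq_getElem _ 0 (by
        simp only [List.length_reverse, List.length_map, List.length_range]
        omega)]
    rw [List.getElem_reverse]
    have hlm : ((List.range arr.length).map (fun j => PySem.Set.len (PySem.Set.ofList (arr.reverse.take (j+1))))).length = arr.length := by simp
    have hidx : ((List.range arr.length).map (fun j => PySem.Set.len (PySem.Set.ofList (arr.reverse.take (j+1))))).length - 1 - (i+1) = arr.length - i - 2 := by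
      rw [hlm]; omega
    rw [pv_getElem_idx _ _ _ hidx]
    rw [List.getElem_map, List.getElem_range]
    have h1 : arr.length - i - 2 + 1 = arr.length - i - 1 := by omega
    rw [h1]
    have h2 : arr.reverse.take (arr.length - i - 1) = (arr.drop (i+1)).reverse := by
      rw [List.take_reverse]
      have h3 : arr.length - (arr.length - i - 1) = i + 1 := by omega
      rw [h3]
    rw [h2]
    show ((PySem.Set.ofList (arr.drop (i+1)).reverse).length : Int) = _
    exact pvD_perm (List.reverse_perm _)
  rw [hgp, hgs]

-- ===== VERDICT (by name: the statement is the Claim_ definition above) =====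
theorem max_distinct_split_sum_spec : Claim_equal_max_distinct_split_sum := by
  intro arr _
  unfold Spec_max_distinct_split_sum
  by_cases hne : arr = []
  · subst hne; decide
  · have hlen : 1 ≤ arr.length := List.length_pos_iff.mpr hne
    have hA : max_distinct_split_sum arr
        = ((PySem.List.pyRange 0 ((arr.length : Int) - 1) 1).foldl
            (fun (st : PySem.Set Int × PySem.Dict Int Int × Int) i =>
              let left_set := st.1
              let rc := st.2.1
              let max_sum := st.2.2
              let num := PySem.List.pyGetD arr i 0
              let left_set := PySem.Set.add left_set num
              let rc := rc.modify num 0 (fun v => v - 1)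
              let rc := if rc.getD num 0 = 0 then rc.erase num else rc
              let current_sum := PySem.Set.len left_set + (rc.size : Int)
              (left_set, rc, max max_sum current_sum))
            (PySem.Set.empty,
             arr.foldl (fun d num => d.insert num (d.getD num 0 + 1)) PySem.Dict.empty, 0)).2.2 := rfl
    rw [rc_init] at hA
    have hcast : ((arr.length : Int) - 1) = ((arr.length - 1 : Nat) : Int) := by omega
    rw [hcast, PySem.List.pyRange_zero_natCast] at hA
    rw [A_loop arr (arr.length - 1) (by omega)] at hA
    rw [B_eq arr hne]
    exact hA
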